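-- pv_equiv track=rewrite | github.com/sheriffff/rubik_flask_backend | objects.py | _parse_movement_list
-- ===== SOURCE A (Python) =====
-- def _parse_movement_list(full_form: str) -> list[str]:
--     """
--     Parse a full form string into a list of movements
--     Args:
--         full_form (str): like "U ML' R"
--     Returns:
--         list[str]: like ["U", "M", "L'", "R"]
--     """
--     while " " in full_form:
--         full_form = full_form.replace(" ", "")
--
--     # Split into individual moves
--     moves = []
--     i = 0
--     while i < len(full_form):
--         move = full_form[i]
--         i += 1
--         # Check if next character is a modifier (2 or ')
--         if i < len(full_form) and full_form[i] in "2'":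
--             move += full_form[i]
--             i += 1
--         moves.append(move)
--
--     return moves
-- ===== SOURCE B (Python) =====
-- import re
--
-- _MOVE_RE = re.compile(r".[2']?", re.DOTALL)
--
-- def _parse_movement_list(full_form: str) -> list[str]:
--     """Tokenize in one regex pass: any char optionally followed by one modifier."""
--     return _MOVE_RE.findall(full_form.replace(" ", ""))
-- ===== Notes on version B (the rewrite author's own statement) =====
-- stated objective: idiomatic
-- what changed: Replaces the hand-written while-loop space stripper and manual index/cursor tokenizer with a single str.replace plus one precompiled regex findall (any char with at most one optional 2/' modifier).
import Mathlib
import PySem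

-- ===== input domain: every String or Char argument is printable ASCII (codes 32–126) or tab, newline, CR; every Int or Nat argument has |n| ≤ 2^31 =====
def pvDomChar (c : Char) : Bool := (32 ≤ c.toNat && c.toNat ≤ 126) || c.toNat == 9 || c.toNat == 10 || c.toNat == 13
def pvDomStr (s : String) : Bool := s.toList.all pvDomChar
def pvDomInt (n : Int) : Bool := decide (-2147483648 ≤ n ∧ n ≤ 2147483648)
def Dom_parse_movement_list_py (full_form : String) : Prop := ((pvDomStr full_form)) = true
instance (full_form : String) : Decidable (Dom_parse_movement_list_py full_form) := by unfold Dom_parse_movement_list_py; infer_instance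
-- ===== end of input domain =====

-- B replaces A's manual while-loop stripper and index-cursor tokenizer by one replace + one regex findall pass; equal return values, no speed claim.

-- ===== PORT A =====

-- replace " " "" removes every space, so count of ' ' strictly decreases (used only for termination)
theorem pvReplaceSpace_go_eq_filter (fuel : Nat) (l acc : List Char) (h : l.length ≤ fuel) :
    PySem.Chars.replace.go [' '] [] fuel l acc = acc.reverse ++ l.filter (· ≠ ' ') := by
  induction fuel generalizing l acc with
  | zero =>
    cases l with
    | nil => simp [PySem.Chars.replace.go]
    | cons c t => simp at h
  | succ n ih =>
    cases l with
    | nil => simp [PySem.Chars.replace.go]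
    | cons c t =>
      by_cases hc : c = ' '
      · subst hc
        have : List.isPrefixOf [' '] (' ' :: t) = true := by simp [List.isPrefixOf]
        simp only [PySem.Chars.replace.go, this, if_pos]
        rw [ih] <;> simp_all
      · have hpre : List.isPrefixOf [' '] (c :: t) = false := by
          simp [List.isPrefixOf]; exact fun h => absurd h.symm hc
        simp only [PySem.Chars.replace.go, hpre]
        rw [if_neg (by simp), ih t (c :: acc) (by simpa using Nat.le_of_succ_le_succ h)]
        simp [hc]

theorem pvReplaceSpace_eq_filter (s : List Char) :
    PySem.Chars.replace s [' '] [] = s.filter (· ≠ ' ') := by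
  simp only [PySem.Chars.replace, List.isEmpty]
  exact pvReplaceSpace_go_eq_filter s.length s [] le_rfl

-- 'while " " in full_form: full_form = full_form.replace(" ", "")'
def pvWhileStrip (s : List Char) : List Char :=
  if ' ' ∈ s then pvWhileStrip (PySem.Chars.replace s [' '] []) else s
termination_by s.count ' '
decreasing_by
  rename_i h
  rw [pvReplaceSpace_eq_filter]
  have : (s.filter (· ≠ ' ')).count ' ' = 0 := by
    simp [List.count_eq_zero, List.mem_filter]
  rw [this]
  exact Nat.pos_of_ne_zero (by simpa [List.count_eq_zero] using h)

-- the index-cursor tokenizing loop of A ('i' advances by 1 or 2, appending to moves)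
def pvLoopA (s : List Char) (i : Nat) (moves : List (List Char)) : List (List Char) :=
  if h : i < s.length then
    let move := [s[i]]
    if h2 : i + 1 < s.length then
      if s[i+1] = '2' ∨ s[i+1] = '\'' then
        pvLoopA s (i + 2) (moves ++ [move ++ [s[i+1]]])
      else
        pvLoopA s (i + 1) (moves ++ [move])
    else
      pvLoopA s (i + 1) (moves ++ [move])
  else moves
termination_by s.length - i

def parse_movement_list_py (full_form : String) : List String :=
  (pvLoopA (pvWhileStrip full_form.toList) 0 []).map String.mk

-- ===== PORT B =====

-- re.findall(r".[2']?", s, re.DOTALL): any one char, then at most one greedy modifier from {2, '}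
def pvFindMoves : List Char → List (List Char)
  | [] => []
  | [c] => [[c]]
  | c :: m :: rest =>
    if m = '2' ∨ m = '\'' then [c, m] :: pvFindMoves rest
    else [c] :: pvFindMoves (m :: rest)

def parse_movement_list_py_alt (full_form : String) : List String :=
  (pvFindMoves (PySem.Chars.replace full_form.toList [' '] [])).map String.mk

-- ===== PRECONDITION & SPEC =====
def Spec_parse_movement_list_py (full_form : String) (out : List String) : Prop := out = parse_movement_list_py_alt full_form
instance (full_form : String) (out : List String) : Decidable (Spec_parse_movement_list_py full_form out) := by unfold Spec_parse_movement_list_py; infer_instance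

-- ===== CLAIM (what is proved, stated in full; the proofs are below) =====
def Claim_equal_parse_movement_list_py : Prop := ∀ (full_form : String), Dom_parse_movement_list_py full_form → Spec_parse_movement_list_py full_form (parse_movement_list_py full_form)

-- ===== LEMMAS AND PROOFS =====

theorem pvWhileStrip_eq (s : List Char) :
    pvWhileStrip s = s.filter (· ≠ ' ') := by
  by_cases h : ' ' ∈ s
  · rw [pvWhileStrip, if_pos h, pvReplaceSpace_eq_filter, pvWhileStrip,
      if_neg (by simp [List.mem_filter])]
  · rw [pvWhileStrip, if_neg h, List.filter_eq_self.mpr]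
    intro a ha
    simp
    exact fun e => h (e ▸ ha)

theorem pvLoopA_eq (s : List Char) (i : Nat) (moves : List (List Char)) :
    pvLoopA s i moves = moves ++ pvFindMoves (s.drop i) := by
  by_cases h : i < s.length
  · have hdrop : s.drop i = s[i] :: s.drop (i + 1) := List.drop_eq_getElem_cons h
    by_cases h2 : i + 1 < s.length
    · have hdrop2 : s.drop (i + 1) = s[i+1] :: s.drop (i + 2) := List.drop_eq_getElem_cons h2
      by_cases hm : s[i+1] = '2' ∨ s[i+1] = '\''
      · rw [pvLoopA, dif_pos h, dif_pos h2, if_pos hm, pvLoopA_eq s (i + 2),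
          hdrop, hdrop2, pvFindMoves, if_pos hm]
        simp
      · rw [pvLoopA, dif_pos h, dif_pos h2, if_neg hm, pvLoopA_eq s (i + 1),
          hdrop, hdrop2, pvFindMoves, if_neg hm]
        simp
    · have hdrop2 : s.drop (i + 1) = [] := by
        apply List.drop_eq_nil_of_le; omega
      rw [pvLoopA, dif_pos h, dif_neg h2, pvLoopA_eq s (i + 1), hdrop, hdrop2]
      simp [pvFindMoves]
  · have : s.drop i = [] := List.drop_eq_nil_of_le (by omega)
    rw [pvLoopA, dif_neg h, this]
    simp [pvFindMoves]
termination_by s.length - i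

-- ===== VERDICT (by name: the statement is the Claim_ definition above) =====
theorem parse_movement_list_py_spec : Claim_equal_parse_movement_list_py := by
  intro full_form _
  unfold Spec_parse_movement_list_py parse_movement_list_py parse_movement_list_py_alt
  rw [pvLoopA_eq, pvWhileStrip_eq, pvReplaceSpace_eq_filter]
  simp
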